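-- pv_equiv track=rewrite | github.com/m3trik/uitk | uitk/widgets/messageBox.py | _setPrefixStyle
-- ===== SOURCE A (Python) =====
-- def _setPrefixStyle(string) -> str:
--     """Set style for specific keywords in the given string."""
--     style = {
--         "Error:": '<hl style="color:red;">Error:</hl>',
--         "Warning:": '<hl style="color:yellow;">Warning:</hl>',
--         "Note:": '<hl style="color:blue;">Note:</hl>',
--         "Result:": '<hl style="color:green;">Result:</hl>',
--     }
--
--     for k, v in style.items():
--         string = string.replace(k, v)
--
--     return string
-- ===== SOURCE B (Python) =====
-- def _setPrefixStyle(string) -> str: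
--     """Set style for specific keywords in the given string."""
--     style = {
--         "Error:": '<hl style="color:red;">Error:</hl>',
--         "Warning:": '<hl style="color:yellow;">Warning:</hl>',
--         "Note:": '<hl style="color:blue;">Note:</hl>',
--         "Result:": '<hl style="color:green;">Result:</hl>',
--     }
--     parts = []
--     i = 0
--     n = len(string)
--     while i < n:
--         for k, v in style.items():
--             if string.startswith(k, i):
--                 parts.append(v)
--                 i += len(k)
--                 break
--         else:
--             parts.append(string[i])
--             i += 1
--     return "".join(parts)
-- ===== Notes on version B (the rewrite author's own statement) =====
-- stated objective: alternative
-- what changed: B replaces A's four sequential full-string replace passes by a single left-to-right scan that tries the four keywords at each position and emits either the HTML value or the current character.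
import Mathlib
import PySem

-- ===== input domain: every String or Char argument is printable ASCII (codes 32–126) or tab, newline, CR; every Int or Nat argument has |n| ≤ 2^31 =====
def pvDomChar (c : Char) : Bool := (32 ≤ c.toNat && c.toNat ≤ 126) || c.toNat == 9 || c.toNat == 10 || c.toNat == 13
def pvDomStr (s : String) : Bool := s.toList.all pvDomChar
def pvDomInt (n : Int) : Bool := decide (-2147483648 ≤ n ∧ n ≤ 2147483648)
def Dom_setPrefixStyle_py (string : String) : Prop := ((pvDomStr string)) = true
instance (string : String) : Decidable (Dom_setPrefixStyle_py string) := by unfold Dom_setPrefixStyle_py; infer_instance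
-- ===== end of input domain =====

-- B replaces A's four sequential full-string replace passes by one left-to-right scan
-- that tries the four keywords at each position (objective: alternative single-pass algorithm).

-- ===== PORT A =====
-- Literal port of A: build the style dict, then fold over its items replacing each key in turn.
def setPrefixStyle_py (string : String) : String :=
  let style : PySem.Dict String String :=
    ((((PySem.Dict.empty).insert "Error:" "<hl style=\"color:red;\">Error:</hl>").insert
        "Warning:" "<hl style=\"color:yellow;\">Warning:</hl>").insert
        "Note:" "<hl style=\"color:blue;\">Note:</hl>").insert
        "Result:" "<hl style=\"color:green;\">Result:</hl>"
  style.items.foldl (fun s kv => PySem.Str.replace s kv.1 kv.2) string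

-- ===== PORT B =====
-- Port of B's while-loop: one scan over the characters, trying the four keywords in order
-- at the current position; on a match emit the HTML value and skip the keyword, else copy one char.
def pvScanB : List Char → List Char
  | [] => []
  | c :: t =>
    if ("Error:".toList).isPrefixOf (c :: t) then
      "<hl style=\"color:red;\">Error:</hl>".toList ++ pvScanB (t.drop 5)
    else if ("Warning:".toList).isPrefixOf (c :: t) then
      "<hl style=\"color:yellow;\">Warning:</hl>".toList ++ pvScanB (t.drop 7)
    else if ("Note:".toList).isPrefixOf (c :: t) then
      "<hl style=\"color:blue;\">Note:</hl>".toList ++ pvScanB (t.drop 4)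
    else if ("Result:".toList).isPrefixOf (c :: t) then
      "<hl style=\"color:green;\">Result:</hl>".toList ++ pvScanB (t.drop 6)
    else c :: pvScanB t
termination_by l => l.length
decreasing_by all_goals (simp [List.length_drop]; try omega)

def setPrefixStyle_py_alt (string : String) : String :=
  String.ofList (pvScanB string.toList)

-- ===== PRECONDITION & SPEC =====
def Spec_setPrefixStyle_py (string : String) (out : String) : Prop := out = setPrefixStyle_py_alt string
instance (string : String) (out : String) : Decidable (Spec_setPrefixStyle_py string out) := by unfold Spec_setPrefixStyle_py; infer_instance

-- ===== CLAIM (what is proved, stated in full; the proofs are below) =====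
def Claim_equal_setPrefixStyle_py : Prop := ∀ (string : String), Dom_setPrefixStyle_py string → Spec_setPrefixStyle_py string (setPrefixStyle_py string)

-- ===== LEMMAS AND PROOFS =====

-- Structural form of Python's str.replace for a nonempty pattern (k0 :: kr), value v.
def pvRep1 (k0 : Char) (kr v : List Char) : List Char → List Char
  | [] => []
  | c :: t =>
    if (k0 :: kr).isPrefixOf (c :: t) then v ++ pvRep1 k0 kr v (t.drop kr.length)
    else c :: pvRep1 k0 kr v t
termination_by l => l.length
decreasing_by all_goals (simp [List.length_drop]; try omega)

theorem pvRep1_nil (k0 : Char) (kr v : List Char) : pvRep1 k0 kr v [] = [] := by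
  simp [pvRep1]

theorem pvRep1_cons_prefix (k0 : Char) (kr v x : List Char) :
    pvRep1 k0 kr v (k0 :: (kr ++ x)) = v ++ pvRep1 k0 kr v x := by
  rw [pvRep1]
  simp [List.isPrefixOf_iff_prefix, List.prefix_append]

theorem pvRep1_cons_not_prefix (k0 : Char) (kr v : List Char) (c : Char) (t : List Char)
    (h : ¬ (k0 :: kr) <+: (c :: t)) :
    pvRep1 k0 kr v (c :: t) = c :: pvRep1 k0 kr v t := by
  rw [pvRep1]
  simp [List.isPrefixOf_iff_prefix, h]

theorem pvReplace_go_eq (k0 : Char) (kr v : List Char) :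
    ∀ (fuel : Nat) (l acc : List Char), l.length ≤ fuel →
      PySem.Chars.replace.go (k0 :: kr) v fuel l acc = acc.reverse ++ pvRep1 k0 kr v l := by
  intro fuel
  induction fuel with
  | zero =>
    intro l acc h
    have : l = [] := List.length_eq_zero_iff.mp (Nat.le_zero.mp h)
    subst this
    simp [PySem.Chars.replace.go, pvRep1_nil]
  | succ n ih =>
    intro l acc h
    cases l with
    | nil => simp [PySem.Chars.replace.go, pvRep1_nil]
    | cons c t =>
      rw [PySem.Chars.replace.go]
      by_cases hp : (k0 :: kr).isPrefixOf (c :: t)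
      · obtain ⟨x, hx⟩ := List.isPrefixOf_iff_prefix.mp hp
        rw [List.cons_append] at hx
        injection hx with h1 h2
        subst h1
        subst h2
        rw [if_pos hp]
        have hd : List.drop (k0 :: kr).length (k0 :: (kr ++ x)) = x := by
          simp [List.drop_succ_cons]
        rw [hd, ih x (v.reverse ++ acc) (by simp at h ⊢; omega), pvRep1_cons_prefix]
        simp
      · rw [if_neg hp]
        rw [ih t (c :: acc) (by simp at h ⊢; omega)]
        rw [pvRep1_cons_not_prefix _ _ _ _ _ (fun hpre => hp (List.isPrefixOf_iff_prefix.mpr hpre))]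
        simp

theorem pvReplace_eq_pvRep1 (k0 : Char) (kr v s : List Char) :
    PySem.Chars.replace s (k0 :: kr) v = pvRep1 k0 kr v s := by
  rw [PySem.Chars.replace]
  simp only [List.isEmpty_cons, if_false, Bool.false_eq_true]
  simpa using pvReplace_go_eq k0 kr v s.length s [] le_rfl

-- If the pattern's first char does not occur in a, replacement passes over a untouched.
theorem pvRep1_append_not_head (k0 : Char) (kr v : List Char) :
    ∀ (a z : List Char), k0 ∉ a → pvRep1 k0 kr v (a ++ z) = a ++ pvRep1 k0 kr v z := by
  intro a
  induction a with
  | nil => intro z _; simp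
  | cons c a' ih =>
    intro z hmem
    have hc : k0 ≠ c := fun h => hmem (by simp [h])
    have hnp : ¬ (k0 :: kr) <+: (c :: (a' ++ z)) := by
      simp [List.cons_prefix_cons]
      intro h; exact absurd h hc
    rw [List.cons_append, pvRep1_cons_not_prefix _ _ _ _ _ hnp,
        ih z (fun h => hmem (by simp [h])), List.cons_append]

-- A keyword (containing no '<') absent as a prefix stays absent after a replacement
-- whose value starts with '<'.
theorem pvRep1_not_prefix (k0' : Char) (kr' v : List Char) (hv : v.head? = some '<') :
    ∀ (k : List Char), '<' ∉ k → ∀ t, ¬ k <+: t → ¬ k <+: pvRep1 k0' kr' v t := by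
  intro k
  induction k with
  | nil => intro _ t ht; exact absurd (List.nil_prefix) ht
  | cons k1 kr1 ih =>
    intro hmem t ht
    cases t with
    | nil => rw [pvRep1_nil]; simp
    | cons c t' =>
      by_cases hp : (k0' :: kr') <+: (c :: t')
      · obtain ⟨hc, hkr⟩ := List.cons_prefix_cons.mp hp
        obtain ⟨x, hx⟩ := hkr
        subst hc
        rw [← hx, pvRep1_cons_prefix]
        obtain ⟨v', hv'⟩ : ∃ v', v = '<' :: v' := by
          cases v with
          | nil => simp at hv
          | cons a b => simp at hv; exact ⟨b, by rw [hv]⟩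
        subst hv'
        intro habs
        have := (List.cons_prefix_cons.mp habs).1
        exact hmem (by simp [this])
      · rw [pvRep1_cons_not_prefix _ _ _ _ _ hp]
        intro habs
        obtain ⟨hc, hkr⟩ := List.cons_prefix_cons.mp habs
        have hk1 : '<' ∉ kr1 := fun h => hmem (by simp [h])
        have : ¬ kr1 <+: t' := by
          intro h
          exact ht (List.cons_prefix_cons.mpr ⟨hc, h⟩)
        exact ih hk1 t' this hkr

-- Keyword/value literals (proof-side names).
def pvTE : List Char := "rror:".toList
def pvTW : List Char := "arning:".toList
def pvTN : List Char := "ote:".toList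
def pvTR : List Char := "esult:".toList
def pvVE : List Char := "<hl style=\"color:red;\">Error:</hl>".toList
def pvVW : List Char := "<hl style=\"color:yellow;\">Warning:</hl>".toList
def pvVN : List Char := "<hl style=\"color:blue;\">Note:</hl>".toList
def pvVR : List Char := "<hl style=\"color:green;\">Result:</hl>".toList

theorem pvKE_eq : "Error:".toList = 'E' :: pvTE := by decide
theorem pvKW_eq : "Warning:".toList = 'W' :: pvTW := by decide
theorem pvKN_eq : "Note:".toList = 'N' :: pvTN := by decide
theorem pvKR_eq : "Result:".toList = 'R' :: pvTR := by decide

-- The composed four replaces of A, in A's order.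
def pvChain (s : List Char) : List Char :=
  pvRep1 'R' pvTR pvVR (pvRep1 'N' pvTN pvVN (pvRep1 'W' pvTW pvVW (pvRep1 'E' pvTE pvVE s)))

theorem pvScanB_nil : pvScanB [] = [] := by simp [pvScanB]

theorem pvScanB_E (x : List Char) : pvScanB ('E' :: (pvTE ++ x)) = pvVE ++ pvScanB x := by
  rw [pvScanB]
  have h5 : pvTE.length = 5 := by decide
  simp [pvKE_eq, List.isPrefixOf_iff_prefix, List.prefix_append,
        pvVE, ← h5]

theorem pvScanB_W (x : List Char) : pvScanB ('W' :: (pvTW ++ x)) = pvVW ++ pvScanB x := by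
  rw [pvScanB]
  have h7 : pvTW.length = 7 := by decide
  simp [pvKE_eq, pvKW_eq, List.isPrefixOf_iff_prefix, List.cons_prefix_cons, List.prefix_append,
        pvVW, ← h7]

theorem pvScanB_N (x : List Char) : pvScanB ('N' :: (pvTN ++ x)) = pvVN ++ pvScanB x := by
  rw [pvScanB]
  have h4 : pvTN.length = 4 := by decide
  simp [pvKE_eq, pvKW_eq, pvKN_eq, List.isPrefixOf_iff_prefix, List.cons_prefix_cons,
        List.prefix_append, pvVN, ← h4]

theorem pvScanB_R (x : List Char) : pvScanB ('R' :: (pvTR ++ x)) = pvVR ++ pvScanB x := by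
  rw [pvScanB]
  have h6 : pvTR.length = 6 := by decide
  simp [pvKE_eq, pvKW_eq, pvKN_eq, pvKR_eq, List.isPrefixOf_iff_prefix, List.cons_prefix_cons,
        List.prefix_append, pvVR, ← h6]

theorem pvScanB_no (c : Char) (t : List Char)
    (hE : ¬ ('E' :: pvTE) <+: (c :: t)) (hW : ¬ ('W' :: pvTW) <+: (c :: t))
    (hN : ¬ ('N' :: pvTN) <+: (c :: t)) (hR : ¬ ('R' :: pvTR) <+: (c :: t)) :
    pvScanB (c :: t) = c :: pvScanB t := by
  rw [pvScanB]
  simp [pvKE_eq, pvKW_eq, pvKN_eq, pvKR_eq, List.isPrefixOf_iff_prefix, hE, hW, hN, hR]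

theorem pv_not_prefix_of_head_ne {k0 c : Char} (h : k0 ≠ c) (kr t : List Char) :
    ¬ (k0 :: kr) <+: (c :: t) :=
  fun hp => h (List.cons_prefix_cons.mp hp).1

theorem pvMain : ∀ (n : Nat) (s : List Char), s.length ≤ n → pvChain s = pvScanB s := by
  intro n
  induction n with
  | zero =>
    intro s h
    have : s = [] := List.length_eq_zero_iff.mp (Nat.le_zero.mp h)
    subst this
    simp [pvChain, pvRep1_nil, pvScanB_nil]
  | succ n ih =>
    intro s h
    cases s with
    | nil => simp [pvChain, pvRep1_nil, pvScanB_nil]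
    | cons c t =>
      by_cases hE : ('E' :: pvTE) <+: (c :: t)
      · obtain ⟨hc, x, hx⟩ := List.cons_prefix_cons.mp hE
        subst hc
        rw [← hx]
        have hlen : x.length ≤ n := by
          have := congrArg List.length hx
          simp at this h
          omega
        rw [pvScanB_E]
        unfold pvChain
        rw [pvRep1_cons_prefix,
            pvRep1_append_not_head _ _ _ pvVE _ (by decide),
            pvRep1_append_not_head _ _ _ pvVE _ (by decide),
            pvRep1_append_not_head _ _ _ pvVE _ (by decide)]
        have := ih x hlen
        unfold pvChain at this
        rw [this]
      · by_cases hW : ('W' :: pvTW) <+: (c :: t)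
        · obtain ⟨hc, x, hx⟩ := List.cons_prefix_cons.mp hW
          subst hc
          rw [← hx]
          have hlen : x.length ≤ n := by
            have := congrArg List.length hx
            simp at this h
            omega
          rw [pvScanB_W]
          unfold pvChain
          rw [pvRep1_cons_not_prefix _ _ _ _ _ (pv_not_prefix_of_head_ne (by decide) _ _),
              pvRep1_append_not_head 'E' pvTE pvVE pvTW _ (by decide),
              pvRep1_cons_prefix,
              pvRep1_append_not_head _ _ _ pvVW _ (by decide),
              pvRep1_append_not_head _ _ _ pvVW _ (by decide)]
          have := ih x hlen
          unfold pvChain at this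
          rw [this]
        · by_cases hN : ('N' :: pvTN) <+: (c :: t)
          · obtain ⟨hc, x, hx⟩ := List.cons_prefix_cons.mp hN
            subst hc
            rw [← hx]
            have hlen : x.length ≤ n := by
              have := congrArg List.length hx
              simp at this h
              omega
            rw [pvScanB_N]
            unfold pvChain
            rw [pvRep1_cons_not_prefix _ _ _ _ _ (pv_not_prefix_of_head_ne (by decide) _ _),
                pvRep1_append_not_head 'E' pvTE pvVE pvTN _ (by decide),
                pvRep1_cons_not_prefix _ _ _ _ _ (pv_not_prefix_of_head_ne (by decide) _ _),
                pvRep1_append_not_head 'W' pvTW pvVW pvTN _ (by decide),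
                pvRep1_cons_prefix,
                pvRep1_append_not_head _ _ _ pvVN _ (by decide)]
            have := ih x hlen
            unfold pvChain at this
            rw [this]
          · by_cases hR : ('R' :: pvTR) <+: (c :: t)
            · obtain ⟨hc, x, hx⟩ := List.cons_prefix_cons.mp hR
              subst hc
              rw [← hx]
              have hlen : x.length ≤ n := by
                have := congrArg List.length hx
                simp at this h
                omega
              rw [pvScanB_R]
              unfold pvChain
              rw [pvRep1_cons_not_prefix _ _ _ _ _ (pv_not_prefix_of_head_ne (by decide) _ _),
                  pvRep1_append_not_head 'E' pvTE pvVE pvTR _ (by decide),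
                  pvRep1_cons_not_prefix _ _ _ _ _ (pv_not_prefix_of_head_ne (by decide) _ _),
                  pvRep1_append_not_head 'W' pvTW pvVW pvTR _ (by decide),
                  pvRep1_cons_not_prefix _ _ _ _ _ (pv_not_prefix_of_head_ne (by decide) _ _),
                  pvRep1_append_not_head 'N' pvTN pvVN pvTR _ (by decide),
                  pvRep1_cons_prefix]
              have := ih x hlen
              unfold pvChain at this
              rw [this]
            · have hlen : t.length ≤ n := by simp at h; omega
              rw [pvScanB_no c t hE hW hN hR]
              unfold pvChain
              have e1 : pvRep1 'E' pvTE pvVE (c :: t) = c :: pvRep1 'E' pvTE pvVE t :=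
                pvRep1_cons_not_prefix _ _ _ _ _ hE
              have h1 : ¬ ('W' :: pvTW) <+: pvRep1 'E' pvTE pvVE (c :: t) :=
                pvRep1_not_prefix 'E' pvTE pvVE (by decide) _ (by decide) _ hW
              rw [e1] at h1
              have e2 : pvRep1 'W' pvTW pvVW (c :: pvRep1 'E' pvTE pvVE t)
                  = c :: pvRep1 'W' pvTW pvVW (pvRep1 'E' pvTE pvVE t) :=
                pvRep1_cons_not_prefix _ _ _ _ _ h1
              have h2 : ¬ ('N' :: pvTN) <+: pvRep1 'W' pvTW pvVW (pvRep1 'E' pvTE pvVE (c :: t)) :=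
                pvRep1_not_prefix 'W' pvTW pvVW (by decide) _ (by decide) _
                  (pvRep1_not_prefix 'E' pvTE pvVE (by decide) _ (by decide) _ hN)
              rw [e1, e2] at h2
              have e3 : pvRep1 'N' pvTN pvVN (c :: pvRep1 'W' pvTW pvVW (pvRep1 'E' pvTE pvVE t))
                  = c :: pvRep1 'N' pvTN pvVN (pvRep1 'W' pvTW pvVW (pvRep1 'E' pvTE pvVE t)) :=
                pvRep1_cons_not_prefix _ _ _ _ _ h2
              have h3 : ¬ ('R' :: pvTR) <+:
                  pvRep1 'N' pvTN pvVN (pvRep1 'W' pvTW pvVW (pvRep1 'E' pvTE pvVE (c :: t))) :=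
                pvRep1_not_prefix 'N' pvTN pvVN (by decide) _ (by decide) _
                  (pvRep1_not_prefix 'W' pvTW pvVW (by decide) _ (by decide) _
                    (pvRep1_not_prefix 'E' pvTE pvVE (by decide) _ (by decide) _ hR))
              rw [e1, e2, e3] at h3
              have e4 : pvRep1 'R' pvTR pvVR
                    (c :: pvRep1 'N' pvTN pvVN (pvRep1 'W' pvTW pvVW (pvRep1 'E' pvTE pvVE t)))
                  = c :: pvRep1 'R' pvTR pvVR
                      (pvRep1 'N' pvTN pvVN (pvRep1 'W' pvTW pvVW (pvRep1 'E' pvTE pvVE t))) :=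
                pvRep1_cons_not_prefix _ _ _ _ _ h3
              rw [e1, e2, e3, e4]
              have := ih t hlen
              unfold pvChain at this
              rw [this]

-- ===== VERDICT (by name: the statement is the Claim_ definition above) =====
theorem setPrefixStyle_py_spec : Claim_equal_setPrefixStyle_py := by
  unfold Claim_equal_setPrefixStyle_py
  intro s _
  unfold Spec_setPrefixStyle_py
  have hA : setPrefixStyle_py s =
      PySem.Str.replace (PySem.Str.replace (PySem.Str.replace (PySem.Str.replace s
        "Error:" "<hl style=\"color:red;\">Error:</hl>")
        "Warning:" "<hl style=\"color:yellow;\">Warning:</hl>")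
        "Note:" "<hl style=\"color:blue;\">Note:</hl>")
        "Result:" "<hl style=\"color:green;\">Result:</hl>" := rfl
  rw [hA]
  unfold setPrefixStyle_py_alt
  apply String.toList_inj.mp
  simp only [PySem.Str.toList_replace, String.toList_ofList]
  rw [pvKE_eq, pvKW_eq, pvKN_eq, pvKR_eq,
      pvReplace_eq_pvRep1, pvReplace_eq_pvRep1, pvReplace_eq_pvRep1, pvReplace_eq_pvRep1]
  exact pvMain s.toList.length s.toList le_rfl
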